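-- pv_equiv track=rewrite | github.com/z520yu/lerobot | pld_rl/rl/serl_resnet10.py | _find_param_any
-- ===== SOURCE A (Python) =====
-- from typing import Any, Dict, Iterable, Mapping, Tuple
--
-- def _find_param(
--     flat: Dict[Tuple[str, ...], Any], suffix: Tuple[str, ...]
-- ) -> Any | None:
--     matches = [v for k, v in flat.items() if k[-len(suffix) :] == suffix]
--     if not matches:
--         return None
--     if len(matches) > 1:
--         raise ValueError(f"Multiple params matched suffix {suffix}: {len(matches)}")
--     return matches[0]
--
-- def _find_param_any(
--     flat: Dict[Tuple[str, ...], Any], suffixes: Iterable[Tuple[str, ...]]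
-- ) -> Any | None:
--     for suffix in suffixes:
--         value = _find_param(flat, suffix)
--         if value is not None:
--             return value
--     return None
-- ===== SOURCE B (Python) =====
-- def _find_param_any(flat, suffixes):
--     suffixes = list(suffixes)
--     lengths = list(dict.fromkeys(len(s) for s in suffixes))
--     index = {}
--     for k, v in flat.items():
--         for L in lengths:
--             key = (L, k[-L:])
--             hit = index.get(key)
--             if hit is not None:
--                 index[key] = (hit[0] + 1, v)
--             else:
--                 index[key] = (1, v)
--     for s in suffixes:
--         hit = index.get((len(s), s))
--         if hit is not None:
--             cnt, value = hit
--             if cnt > 1: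
--                 raise ValueError(f"Multiple params matched suffix {s}: {cnt}")
--             return value
--     return None
-- ===== Notes on version B (the rewrite author's own statement) =====
-- stated objective: faster
-- what changed: Instead of scanning every dict key for every suffix, B makes one pass over the dict building an index keyed by (length, key-tail) with match counts and the last matching value, then answers each suffix with one O(1) lookup.
import Mathlib
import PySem

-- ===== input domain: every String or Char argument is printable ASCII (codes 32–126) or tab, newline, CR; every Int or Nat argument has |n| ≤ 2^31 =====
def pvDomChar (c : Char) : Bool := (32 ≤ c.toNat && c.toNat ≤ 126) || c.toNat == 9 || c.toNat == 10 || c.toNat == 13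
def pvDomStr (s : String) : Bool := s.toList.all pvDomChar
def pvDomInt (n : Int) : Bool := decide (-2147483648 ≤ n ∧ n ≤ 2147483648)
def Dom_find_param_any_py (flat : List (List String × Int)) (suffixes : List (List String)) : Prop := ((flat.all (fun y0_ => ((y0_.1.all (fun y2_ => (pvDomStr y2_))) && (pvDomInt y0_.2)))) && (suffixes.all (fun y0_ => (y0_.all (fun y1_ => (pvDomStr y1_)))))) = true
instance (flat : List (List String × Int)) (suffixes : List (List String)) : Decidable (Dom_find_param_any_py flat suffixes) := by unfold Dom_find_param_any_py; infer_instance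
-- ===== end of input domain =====

-- B replaces A's per-suffix scan of the whole dict with a single pass building a
-- (length, key-tail) → (match count, last value) index, answered by one lookup per suffix
-- (equivalence on the stated Pre_; raising inputs and duplicate-key lists are excluded there).

-- ===== PORT A =====
def find_param_py (flat : List (List String × Int)) (suffix : List String) : Option Int :=
  let ms : List Int :=
    (flat.filter (fun kv => PySem.List.slice kv.1 (some (-(suffix.length : Int))) none == suffix)).map
      (fun kv => kv.2)
  if ms.isEmpty then none
  else if ms.length > 1 then none  -- Python: raise ValueError — excluded by Pre_
  else PySem.List.pyGet? ms 0

def find_param_any_py (flat : List (List String × Int)) (suffixes : List (List String)) : Option Int :=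
  match suffixes with
  | [] => none
  | s :: rest =>
    match find_param_py flat s with
    | some v => some v
    | none => find_param_any_py flat rest

-- ===== PORT B =====
-- one insertion step of Source B's index-building inner loop (key = (L, k[-L:]))
def pvInner (kv : List String × Int) (d : PySem.Dict (Int × List String) (Int × Int)) (L : Int) :
    PySem.Dict (Int × List String) (Int × Int) :=
  let key : Int × List String := (L, PySem.List.slice kv.1 (some (-L)) none)
  match d.get? key with
  | some hit => d.insert key (hit.1 + 1, kv.2)
  | none => d.insert key (1, kv.2)

def pvBuildIndex (flat : List (List String × Int)) (lengths : List Int) :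
    PySem.Dict (Int × List String) (Int × Int) :=
  flat.foldl (fun d kv => lengths.foldl (pvInner kv) d) PySem.Dict.empty

def pvLookupLoop (index : PySem.Dict (Int × List String) (Int × Int)) :
    List (List String) → Option Int
  | [] => none
  | s :: rest =>
    match index.get? ((s.length : Int), s) with
    | some hit => if hit.1 > 1 then none  -- Python: raise ValueError — excluded by Pre_
                  else some hit.2
    | none => pvLookupLoop index rest

def find_param_any_py_alt (flat : List (List String × Int)) (suffixes : List (List String)) : Option Int :=
  let lengths : List Int := PySem.List.dedup (suffixes.map (fun s => (s.length : Int)))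
  pvLookupLoop (pvBuildIndex flat lengths) suffixes

-- ===== PRECONDITION & SPEC =====
-- number of dict entries whose key ends with suffix s (Python's k[-len(s):] == s)
def pvCnt (flat : List (List String × Int)) (s : List String) : Nat :=
  (flat.filter (fun kv => PySem.List.slice kv.1 (some (-(s.length : Int))) none == s)).length

-- Pre_ excludes (a) association lists with duplicate keys, which cannot arise from the Python
-- dict argument (the dict collapses them, the list ports cannot), and (b) inputs where A raises
-- ValueError, i.e. where the first suffix having any match has more than one.
def Pre_find_param_any_py (flat : List (List String × Int)) (suffixes : List (List String)) : Prop :=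
  (flat.map Prod.fst).Nodup ∧
  ∀ i, (hi : i < suffixes.length) →
    (∀ j, (hj : j < i) → pvCnt flat (suffixes[j]'(by omega)) = 0) → pvCnt flat suffixes[i] ≤ 1

instance (flat : List (List String × Int)) (suffixes : List (List String)) :
    Decidable (Pre_find_param_any_py flat suffixes) := by
  unfold Pre_find_param_any_py; infer_instance

def pvWitness_find_param_any_py : (List (List String × Int)) × List (List String) :=
  ([(["a"], 1)], [["a"]])

def Spec_find_param_any_py (flat : List (List String × Int)) (suffixes : List (List String)) (out : Option Int) : Prop := out = find_param_any_py_alt flat suffixes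
instance (flat : List (List String × Int)) (suffixes : List (List String)) (out : Option Int) : Decidable (Spec_find_param_any_py flat suffixes out) := by unfold Spec_find_param_any_py; infer_instance

-- ===== CLAIM (what is proved, stated in full; the proofs are below) =====
def Claim_equal_find_param_any_py : Prop := ∀ (flat : List (List String × Int)) (suffixes : List (List String)), Dom_find_param_any_py flat suffixes → Pre_find_param_any_py flat suffixes → Spec_find_param_any_py flat suffixes (find_param_any_py flat suffixes)

-- ===== LEMMAS AND PROOFS =====

-- the values of the entries matching suffix s, in dict order (A's `matches` list)
def pvMatchVals (flat : List (List String × Int)) (s : List String) : List Int :=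
  (flat.filter (fun kv => PySem.List.slice kv.1 (some (-(s.length : Int))) none == s)).map
    (fun kv => kv.2)

-- the accumulator step Source B's index performs for one matching value
def pvAcc (acc : Option (Int × Int)) (v : Int) : Option (Int × Int) :=
  match acc with
  | some hit => some (hit.1 + 1, v)
  | none => some (1, v)

lemma pvCnt_eq_length (flat : List (List String × Int)) (s : List String) :
    pvCnt flat s = (pvMatchVals flat s).length := by
  simp [pvCnt, pvMatchVals]

lemma get?_pvInner_of_ne (kv : List String × Int) (d : PySem.Dict (Int × List String) (Int × Int))
    (L : Int) (q : Int × List String)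
    (h : q ≠ (L, PySem.List.slice kv.1 (some (-L)) none)) :
    (pvInner kv d L).get? q = d.get? q := by
  unfold pvInner
  cases hg : d.get? (L, PySem.List.slice kv.1 (some (-L)) none) with
  | some hit => simp [hg, PySem.Dict.get?_insert_of_ne _ _ h]
  | none => simp [hg, PySem.Dict.get?_insert_of_ne _ _ h]

lemma get?_pvInner_self (kv : List String × Int) (d : PySem.Dict (Int × List String) (Int × Int))
    (L : Int) :
    (pvInner kv d L).get? (L, PySem.List.slice kv.1 (some (-L)) none) =
      pvAcc (d.get? (L, PySem.List.slice kv.1 (some (-L)) none)) kv.2 := by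
  unfold pvInner pvAcc
  cases hg : d.get? (L, PySem.List.slice kv.1 (some (-L)) none) with
  | some hit => simp [hg, PySem.Dict.get?_insert_self]
  | none => simp [hg, PySem.Dict.get?_insert_self]

lemma get?_innerfold_notmem (lengths : List Int) (kv : List String × Int)
    (d : PySem.Dict (Int × List String) (Int × Int)) (q : Int × List String)
    (hq : q.1 ∉ lengths) :
    (lengths.foldl (pvInner kv) d).get? q = d.get? q := by
  induction lengths generalizing d with
  | nil => rfl
  | cons L ls ih =>
    simp only [List.mem_cons, not_or] at hq
    rw [List.foldl_cons, ih _ hq.2, get?_pvInner_of_ne]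
    intro h; exact hq.1 (by rw [h])

lemma get?_innerfold (lengths : List Int) (kv : List String × Int)
    (d : PySem.Dict (Int × List String) (Int × Int)) (q : Int × List String)
    (hnd : lengths.Nodup) (hq : q.1 ∈ lengths) :
    (lengths.foldl (pvInner kv) d).get? q =
      if PySem.List.slice kv.1 (some (-q.1)) none = q.2 then pvAcc (d.get? q) kv.2
      else d.get? q := by
  induction lengths generalizing d with
  | nil => cases hq
  | cons L ls ih =>
    rw [List.nodup_cons] at hnd
    rw [List.foldl_cons]
    by_cases hL : q.1 = L
    · have hnot : q.1 ∉ ls := by rw [hL]; exact hnd.1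
      rw [get?_innerfold_notmem _ _ _ _ hnot]
      by_cases ht : PySem.List.slice kv.1 (some (-q.1)) none = q.2
      · have hqe : q = (L, PySem.List.slice kv.1 (some (-L)) none) := by
          cases q with
          | mk q1 q2 => simp only at hL ht ⊢; rw [hL] at ht ⊢; rw [ht]
        rw [if_pos ht, hqe, get?_pvInner_self]
      · rw [if_neg ht, get?_pvInner_of_ne]
        intro h
        apply ht
        cases q with
        | mk q1 q2 =>
          simp only [Prod.mk.injEq] at h
          simp only at hL ⊢
          rw [hL, h.2]
    · simp only [List.mem_cons] at hq
      have hq' : q.1 ∈ ls := hq.resolve_left hL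
      rw [ih _ hnd.2 hq', get?_pvInner_of_ne kv d L q (by intro h; exact hL (by rw [h]))]

lemma get?_buildfold (flat : List (List String × Int)) (lengths : List Int)
    (d : PySem.Dict (Int × List String) (Int × Int)) (q : Int × List String)
    (hnd : lengths.Nodup) (hq : q.1 ∈ lengths) :
    ((flat.foldl (fun d kv => lengths.foldl (pvInner kv) d) d).get? q) =
      ((flat.filter (fun kv => PySem.List.slice kv.1 (some (-q.1)) none == q.2)).map
          (fun kv => kv.2)).foldl pvAcc (d.get? q) := by
  induction flat generalizing d with
  | nil => rfl
  | cons kv fl ih =>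
    rw [List.foldl_cons, ih, get?_innerfold _ _ _ _ hnd hq]
    by_cases h : PySem.List.slice kv.1 (some (-q.1)) none = q.2
    · rw [if_pos h, List.filter_cons_of_pos (by simpa using h), List.map_cons, List.foldl_cons]
    · rw [if_neg h, List.filter_cons_of_neg (by simpa using h)]

lemma get?_pvBuildIndex (flat : List (List String × Int)) (lengths : List Int)
    (s : List String) (hnd : lengths.Nodup) (hq : (s.length : Int) ∈ lengths) :
    (pvBuildIndex flat lengths).get? ((s.length : Int), s) =
      (pvMatchVals flat s).foldl pvAcc none := by
  unfold pvBuildIndex pvMatchVals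
  rw [get?_buildfold _ _ _ _ hnd hq]
  rfl

lemma loop_eq (flat : List (List String × Int))
    (index : PySem.Dict (Int × List String) (Int × Int)) :
    ∀ (sfs : List (List String)),
      (∀ s ∈ sfs, index.get? ((s.length : Int), s) = (pvMatchVals flat s).foldl pvAcc none) →
      (∀ i, (hi : i < sfs.length) →
        (∀ j, (hj : j < i) → pvCnt flat (sfs[j]'(by omega)) = 0) → pvCnt flat sfs[i] ≤ 1) →
      pvLookupLoop index sfs = find_param_any_py flat sfs := by
  intro sfs
  induction sfs with
  | nil => intro _ _; rfl
  | cons s rest ih =>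
    intro hget hpre
    have h0 : pvCnt flat s ≤ 1 := by
      have := hpre 0 (by simp) (by intro j hj; omega)
      simpa using this
    have hgs := hget s (by simp)
    unfold pvLookupLoop find_param_any_py find_param_py
    cases hms : pvMatchVals flat s with
    | nil =>
      have hcnt : pvCnt flat s = 0 := by rw [pvCnt_eq_length, hms]; rfl
      rw [hms] at hgs
      simp only [List.foldl_nil] at hgs
      rw [hgs]
      have hmatches : (flat.filter
          (fun kv => PySem.List.slice kv.1 (some (-(s.length : Int))) none == s)).map
          (fun kv => kv.2) = [] := hms
      simp only [hmatches, List.isEmpty_nil, if_pos]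
      exact ih (fun s' hs' => hget s' (by simp [hs']))
        (by
          intro i hi hz
          have := hpre (i + 1) (by simpa using Nat.succ_lt_succ hi)
            (by
              intro j hj
              cases j with
              | zero => simpa using hcnt
              | succ j' => simpa using hz j' (by omega))
          simpa using this)
    | cons v t =>
      have hlen : pvCnt flat s = t.length + 1 := by rw [pvCnt_eq_length, hms]; rfl
      have ht : t = [] := by
        cases t with
        | nil => rfl
        | cons a b => rw [hlen] at h0; simp at h0
      subst ht
      rw [hms] at hgs
      simp only [List.foldl_cons, List.foldl_nil] at hgs
      have hgs' : index.get? ((s.length : Int), s) = some (1, v) := hgs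
      rw [hgs']
      have hmatches : (flat.filter
          (fun kv => PySem.List.slice kv.1 (some (-(s.length : Int))) none == s)).map
          (fun kv => kv.2) = [v] := hms
      simp [hmatches, PySem.List.pyGet?, PySem.List.pyIdx?]

-- ===== VERDICT (by name: the statement is the Claim_ definition above) =====
theorem find_param_any_py_spec : Claim_equal_find_param_any_py := by
  intro flat suffixes _hdom hpre
  unfold Spec_find_param_any_py find_param_any_py_alt
  rw [← loop_eq flat (pvBuildIndex flat
      (PySem.List.dedup (suffixes.map (fun s => (s.length : Int))))) suffixes
    (by
      intro s hs
      exact get?_pvBuildIndex flat _ s (PySem.List.nodup_dedup _)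
        (by rw [PySem.List.mem_dedup]; exact List.mem_map_of_mem hs))
    hpre.2]
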